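-- pv_equiv track=rewrite | github.com/FeiLiu36/MTHS | cvrp/memetic_search.py | _split_into_routes
-- ===== SOURCE A (Python) =====
-- from typing import List, Tuple, Set
--
-- def _split_into_routes(solution: List[int]) -> List[List[int]]:
--     """
--     Splits a flat solution list into a list of routes.
--     """
--     routes = []
--     current_route = [0]
--     for node in solution[1:-1]:
--         if node == 0:
--             current_route.append(0)
--             routes.append(current_route)
--             current_route = [0]
--         else:
--             current_route.append(node)
--     current_route.append(0)
--     routes.append(current_route)
--     return routes
-- ===== SOURCE B (Python) =====
-- from typing import List, Tuple, Set
--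
-- def _split_into_routes(solution: List[int]) -> List[List[int]]:
--     """Split at each zero of solution[1:-1] by repeatedly locating the next
--     zero with list.index and emitting the route as a slice."""
--     routes = []
--     xs = solution[1:-1]
--     while 0 in xs:
--         i = xs.index(0)
--         routes.append([0] + xs[:i] + [0])
--         xs = xs[i + 1:]
--     routes.append([0] + xs + [0])
--     return routes
-- ===== Notes on version B (the rewrite author's own statement) =====
-- stated objective: alternative
-- what changed: A builds routes in one element-by-element loop appending nodes to a mutable current route; B repeatedly locates the next zero with list.index and emits each route as a slice between zeros.
import Mathlib
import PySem

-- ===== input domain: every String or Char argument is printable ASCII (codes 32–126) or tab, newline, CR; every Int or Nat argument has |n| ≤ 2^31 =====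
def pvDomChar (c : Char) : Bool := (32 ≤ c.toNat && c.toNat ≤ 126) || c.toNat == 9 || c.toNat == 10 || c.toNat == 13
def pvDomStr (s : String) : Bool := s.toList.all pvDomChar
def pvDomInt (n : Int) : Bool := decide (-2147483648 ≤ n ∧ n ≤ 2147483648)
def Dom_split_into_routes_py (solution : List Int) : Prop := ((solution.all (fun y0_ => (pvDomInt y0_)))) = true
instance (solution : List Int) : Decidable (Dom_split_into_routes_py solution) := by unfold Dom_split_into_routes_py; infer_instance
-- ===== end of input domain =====

-- B replaces A's single accumulating loop by a recursion that slices between zeros (alternative decomposition, same cost).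

-- ===== PORT A =====
-- loop body of A's for-loop over solution[1:-1]
def pvStepA (st : List (List Int) × List Int) (node : Int) : List (List Int) × List Int :=
  if node = 0 then (st.1 ++ [st.2 ++ [0]], [0]) else (st.1, st.2 ++ [node])

def split_into_routes_py (solution : List Int) : List (List Int) :=
  let inner := PySem.List.slice solution (some 1) (some (-1))   -- solution[1:-1]
  let st := inner.foldl pvStepA ([], [0])
  st.1 ++ [st.2 ++ [0]]

-- ===== PORT B =====
-- Source B's while-loop: '0 in xs' → membership, 'xs.index(0)' → List.idxOf (exact under membership),
-- 'xs[:i]' / 'xs[i+1:]' with 0 ≤ i < len → take i / drop (i+1) (exact: PySem.List.slice_to_natCast / slice_from_natCast)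
def pvSplitLoop (routes : List (List Int)) (xs : List Int) : List (List Int) :=
  if h : (0 : Int) ∈ xs then
    pvSplitLoop (routes ++ [[0] ++ xs.take (xs.idxOf 0) ++ [0]]) (xs.drop (xs.idxOf 0 + 1))
  else
    routes ++ [[0] ++ xs ++ [0]]
termination_by xs.length
decreasing_by
  have h1 := List.idxOf_lt_length_of_mem h
  simp only [List.length_drop]
  omega

def split_into_routes_py_alt (solution : List Int) : List (List Int) :=
  pvSplitLoop [] (PySem.List.slice solution (some 1) (some (-1)))

-- ===== PRECONDITION & SPEC =====
def Spec_split_into_routes_py (solution : List Int) (out : List (List Int)) : Prop := out = split_into_routes_py_alt solution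
instance (solution : List Int) (out : List (List Int)) : Decidable (Spec_split_into_routes_py solution out) := by unfold Spec_split_into_routes_py; infer_instance

-- ===== CLAIM (what is proved, stated in full; the proofs are below) =====
def Claim_equal_split_into_routes_py : Prop := ∀ (solution : List Int), Dom_split_into_routes_py solution → Spec_split_into_routes_py solution (split_into_routes_py solution)

-- ===== LEMMAS AND PROOFS =====

-- recursive characterisation of B's while-loop (proof helper only)
def pvSplit (xs : List Int) : List (List Int) :=
  if h : (0 : Int) ∈ xs then
    ([0] ++ xs.take (xs.idxOf 0) ++ [0]) :: pvSplit (xs.drop (xs.idxOf 0 + 1))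
  else
    [[0] ++ xs ++ [0]]
termination_by xs.length
decreasing_by
  have h1 := List.idxOf_lt_length_of_mem h
  simp only [List.length_drop]
  omega

lemma pvSplitLoop_eq (routes : List (List Int)) (xs : List Int) :
    pvSplitLoop routes xs = routes ++ pvSplit xs := by
  fun_induction pvSplitLoop routes xs with
  | case1 routes xs h ih =>
      rw [ih]
      conv_rhs => rw [pvSplit]
      simp [dif_pos h]
  | case2 routes xs h =>
      conv_rhs => rw [pvSplit]
      simp [dif_neg h]

-- head-prefix glue: replaces the leading 0 of the first route by the partially built current route
def pvAttach (cur : List Int) : List (List Int) → List (List Int)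
  | [] => []
  | h :: t => (cur ++ h.drop 1) :: t

lemma pvSplit_head (xs : List Int) : ∃ h t, pvSplit xs = ((0 : Int) :: h) :: t := by
  rw [pvSplit]
  split_ifs with h
  · exact ⟨_, _, rfl⟩
  · exact ⟨_, _, rfl⟩

lemma pvAttach_zero (xs : List Int) : pvAttach [0] (pvSplit xs) = pvSplit xs := by
  obtain ⟨h, t, he⟩ := pvSplit_head xs
  rw [he]; simp [pvAttach]

lemma pvSplit_cons_zero (rest : List Int) :
    pvSplit (0 :: rest) = [0, 0] :: pvSplit rest := by
  rw [pvSplit]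
  simp [List.idxOf_cons_self]

lemma pvSplit_cons_ne (x : Int) (rest : List Int) (hx : x ≠ 0) (cur : List Int) :
    pvAttach cur (pvSplit (x :: rest)) = pvAttach (cur ++ [x]) (pvSplit rest) := by
  conv_lhs => rw [pvSplit]
  conv_rhs => rw [pvSplit]
  have hmem : ((0 : Int) ∈ x :: rest) ↔ ((0 : Int) ∈ rest) := by
    simp [List.mem_cons, Ne.symm hx]
  by_cases h0 : (0 : Int) ∈ rest
  · rw [dif_pos (hmem.mpr h0), dif_pos h0]
    have hidx : (x :: rest).idxOf (0 : Int) = rest.idxOf 0 + 1 := by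
      simp [hx]
    rw [hidx]
    simp [pvAttach, List.drop_succ_cons]
  · rw [dif_neg (fun hc => h0 (hmem.mp hc)), dif_neg h0]
    simp [pvAttach]

lemma loop_eq (xs : List Int) : ∀ (routes : List (List Int)) (cur : List Int),
    (xs.foldl pvStepA (routes, cur)).1 ++ [(xs.foldl pvStepA (routes, cur)).2 ++ [0]] =
      routes ++ pvAttach cur (pvSplit xs) := by
  induction xs with
  | nil =>
    intro routes cur
    rw [pvSplit]
    simp [pvAttach]
  | cons x rest ih =>
    intro routes cur
    by_cases hx : x = 0
    · subst hx
      rw [List.foldl_cons]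
      have hstep : pvStepA (routes, cur) 0 = (routes ++ [cur ++ [0]], [0]) := by
        simp [pvStepA]
      rw [hstep, ih, pvAttach_zero, pvSplit_cons_zero]
      simp [pvAttach]
    · simp only [List.foldl_cons, pvStepA, if_neg hx]
      rw [ih, pvSplit_cons_ne x rest hx cur]

-- ===== VERDICT (by name: the statement is the Claim_ definition above) =====
theorem split_into_routes_py_spec : Claim_equal_split_into_routes_py := by
  intro solution _
  unfold Spec_split_into_routes_py split_into_routes_py split_into_routes_py_alt
  simp only
  rw [loop_eq, pvSplitLoop_eq]
  simp [pvAttach_zero]
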